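-- pv_equiv track=rewrite | github.com/justNo4b/Pytteliten | minifier/minifier.py | group_tokens
-- ===== SOURCE A (Python) =====
-- def group_tokens(token_list: list, start: list, end: list, include_end: bool = True, include_space: bool = True) -> list:
--     """Finds ``start`` tokens and concatenates everything from ``start``-``end``."""
--     output = []
--
--     # This is the start index where we look for first index such that [idx + len(start)] <=> start
--     start_idx = 0
--
--     while start_idx < len(token_list):
--
--         # end must be after the start, so set it to start + 1
--         end_idx = start_idx + 1
--
--         # Verify that there is still space in the token list in the first condition.
--         # In the second condition, check that start that was passed in ==
--         # token_list starting at start_idx till start_idx + len(start).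
--         # Recollect that start_idx is just an idx, and start_idx + len(start) is a
--         # subsequence of token_list of size len(start)
--         if (start_idx + len(start) <= len(token_list)) and (start == token_list[start_idx:start_idx + len(start)]):
--
--             # Search all possible end idxs from the end of the start to the end of the string.
--             # Give padding for the size of the end token.
--             for possible_end_idx in range(end_idx + len(start) - 1, len(token_list) - len(end) + 1):
--
--                 # Similar to the first condition, check if from end idx to len(end) == passed in end.
--                 if end == token_list[possible_end_idx: possible_end_idx + len(end)]:
--                     # Just include the whole end if that param is true.
--                     end_idx = possible_end_idx + \
--                         len(end) if include_end else possible_end_idx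
--                     break
--
--         # Self-explanatory, join everything from start to end. If we never found anything this is
--         # start:start+1 because we set end_idx to start + 1 at the beginning.
--         # This adds just the token if we found nothing.
--         grouped_tokens = "".join(token_list[start_idx:end_idx])
--         if not include_space and end_idx != start_idx + 1:
--             grouped_tokens = grouped_tokens.replace(" ", "")
--
--         output.append(grouped_tokens)
--
--         # We searched everything from start to end, so no need to research. set start to old end.
--         start_idx = end_idx
--
--     return output
-- ===== SOURCE B (Python) =====
-- def group_tokens(token_list: list, start: list, end: list, include_end: bool = True, include_space: bool = True) -> list:
--     """Finds ``start`` tokens and concatenates everything from ``start``-``end``.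
--
--     Re-implementation in two staged passes: first compute the list of all
--     end-pattern match positions once and from it the (begin, end) boundary
--     pairs of every group; then render each pair to its string. A instead
--     fuses everything into one loop that rescans the tail per start match.
--     """
--     n, ls, le = len(token_list), len(start), len(end)
--     end_pos = [p for p in range(n - le + 1) if end == token_list[p:p + le]]
--
--     def first_end_at_least(t):
--         for p in end_pos:
--             if p >= t:
--                 return p
--         return None
--
--     # pass 1: group boundaries
--     bounds = []
--     i = 0
--     while i < n:
--         j = i + 1
--         if i + ls <= n and start == token_list[i:i + ls]:
--             p = first_end_at_least(i + ls)
--             if p is not None: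
--                 j = p + le if include_end else p
--         bounds.append((i, j))
--         i = j
--
--     # pass 2: render each group
--     def render(pair):
--         b, e = pair
--         s = "".join(token_list[b:e])
--         return s if include_space or e == b + 1 else s.replace(" ", "")
--
--     return [render(pair) for pair in bounds]
-- ===== Notes on version B (the rewrite author's own statement) =====
-- stated objective: alternative
-- what changed: B works in two staged passes over different data: it precomputes all end-pattern match positions once and a list of (begin,end) boundary pairs of the groups, then renders each pair to its string in a separate mapping pass, instead of A's single fused loop that rescans (and re-slices) the tail of the token list for the end pattern at every start match.
import Mathlib
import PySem

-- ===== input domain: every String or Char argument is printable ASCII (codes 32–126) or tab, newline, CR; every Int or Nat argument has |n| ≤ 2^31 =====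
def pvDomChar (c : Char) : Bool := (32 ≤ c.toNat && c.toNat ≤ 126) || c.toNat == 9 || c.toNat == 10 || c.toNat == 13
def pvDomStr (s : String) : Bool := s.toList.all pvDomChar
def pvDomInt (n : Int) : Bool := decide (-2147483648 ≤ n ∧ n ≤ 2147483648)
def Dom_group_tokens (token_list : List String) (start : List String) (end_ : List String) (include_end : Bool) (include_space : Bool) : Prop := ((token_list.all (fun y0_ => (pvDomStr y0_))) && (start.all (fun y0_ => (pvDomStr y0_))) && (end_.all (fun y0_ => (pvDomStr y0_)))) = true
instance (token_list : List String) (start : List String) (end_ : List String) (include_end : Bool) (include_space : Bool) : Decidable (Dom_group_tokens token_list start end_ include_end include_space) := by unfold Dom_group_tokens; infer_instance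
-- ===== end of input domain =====

-- B computes the group boundaries in a first pass (over a once-precomputed list of all
-- end-match positions) and renders them to strings in a second mapping pass, instead of
-- A's single fused loop that rescans the tail per start match (objective: alternative).

-- ===== PORT A =====

-- the 'for possible_end_idx in range(...): if end == tl[p:p+len(end)]: break' scan: first match in the range
def findEndA (token_list end_ : List String) : List Int → Option Int
  | [] => none
  | p :: rest =>
    if end_ = PySem.List.slice token_list (some p) (some (p + end_.length)) then some p
    else findEndA token_list end_ rest

-- the while loop; fuel only makes the recursion total (on an empty start pattern the Python loop can fail to advance)
def loopA (token_list start end_ : List String) (include_end include_space : Bool) : Nat → Int → List String → List String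
  | 0, _, output => output
  | fuel + 1, start_idx, output =>
    if start_idx < (token_list.length : Int) then
      let end_idx0 : Int := start_idx + 1
      let end_idx : Int :=
        if start_idx + (start.length : Int) ≤ (token_list.length : Int) ∧
            start = PySem.List.slice token_list (some start_idx) (some (start_idx + (start.length : Int))) then
          match findEndA token_list end_
              (PySem.List.pyRange (end_idx0 + (start.length : Int) - 1)
                ((token_list.length : Int) - (end_.length : Int) + 1)) with
          | some p => if include_end then p + (end_.length : Int) else p
          | none => end_idx0
        else end_idx0
      let grouped := PySem.Str.join "" (PySem.List.slice token_list (some start_idx) (some end_idx))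
      let grouped := if include_space = false ∧ end_idx ≠ start_idx + 1 then PySem.Str.replace grouped " " "" else grouped
      loopA token_list start end_ include_end include_space fuel end_idx (output ++ [grouped])
    else output

def group_tokens (token_list : List String) (start : List String) (end_ : List String) (include_end : Bool) (include_space : Bool) : List String :=
  loopA token_list start end_ include_end include_space (token_list.length + 1) 0 []

-- ===== PORT B =====

-- the comprehension: every p with end == token_list[p:p+len(end)], in increasing order
def endPositions (token_list end_ : List String) : List Int :=
  (PySem.List.pyRange 0 ((token_list.length : Int) - (end_.length : Int) + 1)).filter
    (fun p => decide (end_ = PySem.List.slice token_list (some p) (some (p + end_.length))))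

-- Source B's first_end_at_least: first element ≥ t of the precomputed positions
def firstEndAtLeast (t : Int) : List Int → Option Int
  | [] => none
  | p :: rest => if t ≤ p then some p else firstEndAtLeast t rest

-- pass 1 of B: the (begin, end) boundary pair of every group; fuel only for totality
def boundsB (token_list start end_ : List String) (include_end : Bool) (end_pos : List Int) : Nat → Int → List (Int × Int)
  | 0, _ => []
  | fuel + 1, i =>
    if i < (token_list.length : Int) then
      let j : Int :=
        if i + (start.length : Int) ≤ (token_list.length : Int) ∧
            start = PySem.List.slice token_list (some i) (some (i + (start.length : Int))) then
          match firstEndAtLeast (i + (start.length : Int)) end_pos with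
          | some p => if include_end then p + (end_.length : Int) else p
          | none => i + 1
        else i + 1
      (i, j) :: boundsB token_list start end_ include_end end_pos fuel j
    else []

-- pass 2 of B: render one boundary pair
def renderB (token_list : List String) (include_space : Bool) (pair : Int × Int) : String :=
  let s := PySem.Str.join "" (PySem.List.slice token_list (some pair.1) (some pair.2))
  if include_space || pair.2 == pair.1 + 1 then s else PySem.Str.replace s " " ""

def group_tokens_alt (token_list : List String) (start : List String) (end_ : List String) (include_end : Bool) (include_space : Bool) : List String :=
  (boundsB token_list start end_ include_end (endPositions token_list end_) (token_list.length + 1) 0).map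
    (renderB token_list include_space)

-- ===== PRECONDITION & SPEC =====
-- (no Pre_: the ports, made total by fuel, agree on every input)
def Spec_group_tokens (token_list : List String) (start : List String) (end_ : List String) (include_end : Bool) (include_space : Bool) (out : List String) : Prop := out = group_tokens_alt token_list start end_ include_end include_space
instance (token_list : List String) (start : List String) (end_ : List String) (include_end : Bool) (include_space : Bool) (out : List String) : Decidable (Spec_group_tokens token_list start end_ include_end include_space out) := by unfold Spec_group_tokens; infer_instance

-- ===== CLAIM (what is proved, stated in full; the proofs are below) =====
def Claim_equal_group_tokens : Prop := ∀ (token_list : List String) (start : List String) (end_ : List String) (include_end : Bool) (include_space : Bool), Dom_group_tokens token_list start end_ include_end include_space → Spec_group_tokens token_list start end_ include_end include_space (group_tokens token_list start end_ include_end include_space)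

-- ===== LEMMAS AND PROOFS =====

-- A's scan-with-break is List.find?
theorem findEndA_eq_find? (token_list end_ : List String) (l : List Int) :
    findEndA token_list end_ l
      = l.find? (fun p => decide (end_ = PySem.List.slice token_list (some p) (some (p + end_.length)))) := by
  induction l with
  | nil => rfl
  | cons p rest ih =>
    by_cases h : end_ = PySem.List.slice token_list (some p) (some (p + end_.length))
    · rw [findEndA, if_pos h, List.find?_cons_of_pos (by simpa using h)]
    · rw [findEndA, if_neg h, List.find?_cons_of_neg (by simpa using h), ih]

-- B's scan is find? (t ≤ ·)
theorem firstEndAtLeast_eq_find? (t : Int) (l : List Int) :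
    firstEndAtLeast t l = l.find? (fun p => decide (t ≤ p)) := by
  induction l with
  | nil => rfl
  | cons p rest ih =>
    by_cases h : t ≤ p
    · rw [firstEndAtLeast, if_pos h, List.find?_cons_of_pos (by simpa using h)]
    · rw [firstEndAtLeast, if_neg h, List.find?_cons_of_neg (by simpa using h), ih]

-- find? only looks at members: predicates agreeing on the list give the same result
theorem find?_mem_congr {α : Type} {l : List α} {p q : α → Bool}
    (h : ∀ x ∈ l, p x = q x) : l.find? p = l.find? q := by
  induction l with
  | nil => rfl
  | cons x tl ih =>
    by_cases hx : q x = true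
    · rw [List.find?_cons_of_pos ((h x (by simp)).trans hx),
        List.find?_cons_of_pos hx]
    · rw [List.find?_cons_of_neg (by rw [h x (by simp)]; exact hx),
        List.find?_cons_of_neg hx, ih (fun y hy => h y (by simp [hy]))]

-- searching the precomputed positions from t equals A's scan of range(t, m)
theorem endPositions_find?_eq (token_list end_ : List String) (t : Int) (ht : 0 ≤ t) :
    (endPositions token_list end_).find? (fun p => decide (t ≤ p))
      = findEndA token_list end_
          (PySem.List.pyRange t ((token_list.length : Int) - (end_.length : Int) + 1)) := by
  set m : Int := (token_list.length : Int) - (end_.length : Int) + 1 with hm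
  rw [findEndA_eq_find?, endPositions, List.find?_filter]
  by_cases htm : t ≤ m
  · rw [PySem.List.pyRange_one_append 0 t m ht htm, List.find?_append]
    have h1 : (PySem.List.pyRange 0 t).find?
        (fun a => decide (decide (end_ = PySem.List.slice token_list (some a) (some (a + end_.length))) = true ∧ decide (t ≤ a) = true)) = none := by
      apply List.find?_eq_none.mpr
      intro x hx
      have := (PySem.List.mem_pyRange_one.mp hx).2
      simp only [decide_eq_true_eq]
      rintro ⟨-, hc⟩; omega
    rw [h1, Option.none_or]
    apply find?_mem_congr
    intro x hx
    have h5 := (PySem.List.mem_pyRange_one.mp hx).1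
    have ht' : decide (t ≤ x) = true := decide_eq_true h5
    simp only [ht', and_true, Bool.decide_eq_true]
  · rw [(PySem.List.pyRange_one_eq_nil (by omega) : PySem.List.pyRange t m = [])]
    simp only [List.find?_nil]
    apply List.find?_eq_none.mpr
    intro x hx
    have h2 := (PySem.List.mem_pyRange_one.mp hx).2
    have h3 := (PySem.List.mem_pyRange_one.mp hx).1
    simp only [decide_eq_true_eq]
    intro h4
    omega

theorem endPositions_nonneg (token_list end_ : List String) :
    ∀ p ∈ endPositions token_list end_, 0 ≤ p := by
  intro p hp
  have := List.mem_of_mem_filter hp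
  exact (PySem.List.mem_pyRange_one.mp this).1

-- A's inline join+replace equals B's renderer on the pair (i, j)
theorem render_eq (token_list : List String) (include_space : Bool) (i j : Int) :
    (if include_space = false ∧ j ≠ i + 1 then
        PySem.Str.replace (PySem.Str.join "" (PySem.List.slice token_list (some i) (some j))) " " ""
      else PySem.Str.join "" (PySem.List.slice token_list (some i) (some j)))
      = renderB token_list include_space (i, j) := by
  unfold renderB
  by_cases hsp : include_space = false ∧ j ≠ i + 1
  · rw [if_pos hsp]
    have hb : (include_space || j == i + 1) = false := by
      obtain ⟨h1, h2⟩ := hsp; simp [h1, h2]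
    simp only [hb, if_neg (by simp : ¬ (false = true))]
  · rw [if_neg hsp]
    have hb : (include_space || j == i + 1) = true := by
      rcases Decidable.not_and_iff_not_or_not.mp hsp with h | h
      · have h' : include_space = true := by cases include_space <;> simp_all
        simp [h']
      · simp [Decidable.not_not.mp h]
    simp [hb]

-- A's fused loop equals B's boundary pass followed by the rendering pass
theorem loop_eq (token_list start end_ : List String) (include_end include_space : Bool) :
    ∀ (fuel : Nat) (i : Int) (output : List String), 0 ≤ i →
      loopA token_list start end_ include_end include_space fuel i output
        = output ++ (boundsB token_list start end_ include_end (endPositions token_list end_) fuel i).map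
            (renderB token_list include_space) := by
  intro fuel
  induction fuel with
  | zero => intro i output _; simp [loopA, boundsB]
  | succ fuel ih =>
    intro i output hi
    rw [loopA, boundsB]
    by_cases hcond : i < (token_list.length : Int)
    · simp only [if_pos hcond]
      have hopt :
          (match findEndA token_list end_
              (PySem.List.pyRange (i + 1 + (start.length : Int) - 1)
                ((token_list.length : Int) - (end_.length : Int) + 1)) with
            | some p => if include_end then p + (end_.length : Int) else p
            | none => i + 1)
          = (match firstEndAtLeast (i + (start.length : Int)) (endPositions token_list end_) with
            | some p => if include_end then p + (end_.length : Int) else p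
            | none => i + 1) := by
        have harg : i + 1 + (start.length : Int) - 1 = i + (start.length : Int) := by ring
        rw [harg, firstEndAtLeast_eq_find?,
          endPositions_find?_eq token_list end_ (i + (start.length : Int)) (by omega)]
      by_cases hg : i + (start.length : Int) ≤ (token_list.length : Int) ∧
          start = PySem.List.slice token_list (some i) (some (i + (start.length : Int)))
      · simp only [if_pos hg, hopt]
        have hj0 : 0 ≤ (match firstEndAtLeast (i + (start.length : Int)) (endPositions token_list end_) with
            | some p => if include_end then p + (end_.length : Int) else p
            | none => i + 1) := by
          cases hfe : firstEndAtLeast (i + (start.length : Int)) (endPositions token_list end_) with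
          | none =>
            show (0 : Int) ≤ i + 1
            omega
          | some p =>
            rw [firstEndAtLeast_eq_find?] at hfe
            have hp := endPositions_nonneg token_list end_ p (List.mem_of_find?_eq_some hfe)
            show (0 : Int) ≤ if include_end then p + (end_.length : Int) else p
            split_ifs <;> omega
        rw [ih _ _ hj0, List.map_cons, render_eq]
        simp
      · simp only [if_neg hg]
        rw [ih (i + 1) _ (by omega), List.map_cons, render_eq]
        simp
    · simp [if_neg hcond]

-- ===== VERDICT (by name: the statement is the Claim_ definition above) =====
theorem group_tokens_spec : Claim_equal_group_tokens := by
  intro token_list start end_ include_end include_space _hDom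
  unfold Spec_group_tokens group_tokens group_tokens_alt
  exact loop_eq token_list start end_ include_end include_space (token_list.length + 1) 0 [] le_rfl
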